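-- pv_equiv track=rewrite | github.com/agpenas/advent-of-code-2024 | day24/code_logic.py | extract_wrong_and_operations
-- ===== SOURCE A (Python) =====
-- from typing import Dict, List, Tuple
--
-- def extract_wrong_and_operations(
--     result_var_to_operations: Dict[str, Tuple[str]], input_values_dict: Dict[str, int]
-- ):
--     for result, operation_tuple in result_var_to_operations.items():
--         if operation_tuple[1] == "AND":
--             # Missing this: First one can be half adder
--             if "x00" in operation_tuple:
--                 continue
--             for operation in result_var_to_operations.values():
--                 if result in operation and operation[1] != "OR":
--                     yield result
-- ===== SOURCE B (Python) =====
-- def extract_wrong_and_operations(result_var_to_operations, input_values_dict):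
--     # Alternative decomposition: one pass builds var -> number of non-OR operations containing it; then a single
--     # pass over the items emits each AND result that many times.
--     cnt = {}
--     for operation in result_var_to_operations.values():
--         if operation[1] != "OR":
--             for var in set(operation):
--                 cnt[var] = cnt.get(var, 0) + 1
--     for result, operation_tuple in result_var_to_operations.items():
--         if operation_tuple[1] == "AND" and "x00" not in operation_tuple:
--             yield from [result] * cnt.get(result, 0)
-- ===== Notes on version B (the rewrite author's own statement) =====
-- stated objective: alternative
-- what changed: Instead of rescanning all operation tuples once per AND result, B precomputes in one pass a counter mapping each variable to the number of non-OR operations containing it, then emits each qualifying AND result that many times in a single pass over the items; it trades A's per-AND-result inner scan for an up-front counter build.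
import Mathlib
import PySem

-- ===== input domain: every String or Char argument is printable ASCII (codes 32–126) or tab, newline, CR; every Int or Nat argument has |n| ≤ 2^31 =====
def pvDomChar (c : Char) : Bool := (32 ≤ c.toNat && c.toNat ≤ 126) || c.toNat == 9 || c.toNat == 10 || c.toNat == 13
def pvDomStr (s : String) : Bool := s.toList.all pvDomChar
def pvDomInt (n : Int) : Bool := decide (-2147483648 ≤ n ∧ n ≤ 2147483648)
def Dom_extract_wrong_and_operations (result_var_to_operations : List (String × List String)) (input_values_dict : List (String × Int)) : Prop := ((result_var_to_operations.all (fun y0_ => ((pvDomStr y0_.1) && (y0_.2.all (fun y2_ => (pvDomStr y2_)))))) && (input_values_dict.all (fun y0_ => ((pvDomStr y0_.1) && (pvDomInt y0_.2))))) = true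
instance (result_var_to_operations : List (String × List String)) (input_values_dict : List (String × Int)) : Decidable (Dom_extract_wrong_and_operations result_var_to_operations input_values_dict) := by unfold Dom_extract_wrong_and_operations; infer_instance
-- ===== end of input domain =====

-- B replaces A's inner rescan of all operation tuples per AND-result by a precomputed
-- counter (variable -> number of non-OR operations containing it): a different, single-pass decomposition.


-- ===== PORT A =====
-- literal port of A: for each item, if tuple[1]=="AND" and "x00" not in tuple,
-- rescan all values and yield the result once per non-OR operation containing it
def extract_wrong_and_operations (result_var_to_operations : List (String × List String)) (input_values_dict : List (String × Int)) : List String :=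
  let d := PySem.Dict.ofList result_var_to_operations
  d.items.foldl (fun acc p =>
    if PySem.List.pyGetD p.2 1 "" = "AND" then
      if p.2.contains "x00" then acc
      else
        d.values.foldl (fun a op =>
          if op.contains p.1 then
            if PySem.List.pyGetD op 1 "" ≠ "OR" then a ++ [p.1] else a
          else a) acc
    else acc) []

-- ===== PORT B =====
-- counter pass of Source B: cnt[var] = number of non-OR operations whose tuple contains var
def pvCnt (vs : List (List String)) : PySem.Dict String Int :=
  vs.foldl (fun c op =>
    if PySem.List.pyGetD op 1 "" ≠ "OR" then
      (PySem.Set.ofList op).foldl (fun c v => c.modify v 0 (· + 1)) c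
    else c) PySem.Dict.empty

def extract_wrong_and_operations_alt (result_var_to_operations : List (String × List String)) (input_values_dict : List (String × Int)) : List String :=
  let d := PySem.Dict.ofList result_var_to_operations
  let cnt := pvCnt d.values
  d.items.foldl (fun acc p =>
    if PySem.List.pyGetD p.2 1 "" = "AND" ∧ p.2.contains "x00" = false then
      acc ++ List.replicate (cnt.getD p.1 0).toNat p.1
    else acc) []

-- ===== PRECONDITION & SPEC =====
-- Python indexes operation_tuple[1] for every stored tuple: A (and B) raise IndexError
-- exactly when some stored operation tuple has fewer than 2 entries; Pre_ excludes those.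
def Pre_extract_wrong_and_operations (result_var_to_operations : List (String × List String)) (input_values_dict : List (String × Int)) : Prop :=
  ∀ p ∈ (PySem.Dict.ofList result_var_to_operations).items, 2 ≤ p.2.length
instance (result_var_to_operations : List (String × List String)) (input_values_dict : List (String × Int)) : Decidable (Pre_extract_wrong_and_operations result_var_to_operations input_values_dict) := by unfold Pre_extract_wrong_and_operations; infer_instance

def pvWitness_extract_wrong_and_operations : (List (String × List String)) × (List (String × Int)) :=
  ([("z1", ["x01", "AND", "y01"]), ("z2", ["z1", "XOR", "c1"])], [("x01", 1)])

def Spec_extract_wrong_and_operations (result_var_to_operations : List (String × List String)) (input_values_dict : List (String × Int)) (out : List String) : Prop := out = extract_wrong_and_operations_alt result_var_to_operations input_values_dict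
instance (result_var_to_operations : List (String × List String)) (input_values_dict : List (String × Int)) (out : List String) : Decidable (Spec_extract_wrong_and_operations result_var_to_operations input_values_dict out) := by unfold Spec_extract_wrong_and_operations; infer_instance

-- ===== CLAIM (what is proved, stated in full; the proofs are below) =====
def Claim_equal_extract_wrong_and_operations : Prop := ∀ (result_var_to_operations : List (String × List String)) (input_values_dict : List (String × Int)), Dom_extract_wrong_and_operations result_var_to_operations input_values_dict → Pre_extract_wrong_and_operations result_var_to_operations input_values_dict → Spec_extract_wrong_and_operations result_var_to_operations input_values_dict (extract_wrong_and_operations result_var_to_operations input_values_dict)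

-- ===== LEMMAS AND PROOFS =====

-- A's inner scan over the values appends one copy of r per non-OR operation containing r
theorem pv_inner_eq (r : String) (vs : List (List String)) (acc : List String) :
    vs.foldl (fun a op =>
      if op.contains r then
        if PySem.List.pyGetD op 1 "" ≠ "OR" then a ++ [r] else a
      else a) acc
    = acc ++ List.replicate
        (vs.countP (fun op => op.contains r && !(PySem.List.pyGetD op 1 "" == "OR"))) r := by
  induction vs generalizing acc with
  | nil => simp
  | cons op vs ih =>
    simp only [List.foldl_cons, List.countP_cons]
    rw [ih]
    by_cases hm : r ∈ op
    · by_cases h2 : PySem.List.pyGetD op 1 "" = "OR"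
      · simp [hm, h2]
      · simp [hm, h2, List.replicate_add]
        rw [← List.replicate_succ, List.replicate_succ']
    · simp [hm]

-- the counter's entry at r counts the same operations
theorem pv_cnt_getD (r : String) (vs : List (List String)) (c : PySem.Dict String Int) :
    (vs.foldl (fun c op =>
        if PySem.List.pyGetD op 1 "" ≠ "OR" then
          (PySem.Set.ofList op).foldl (fun c v => c.modify v 0 (· + 1)) c
        else c) c).getD r 0
    = c.getD r 0 + (vs.countP (fun op => op.contains r && !(PySem.List.pyGetD op 1 "" == "OR")) : Nat) := by
  induction vs generalizing c with
  | nil => simp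
  | cons op vs ih =>
    simp only [List.foldl_cons, List.countP_cons]
    by_cases h2 : PySem.List.pyGetD op 1 "" = "OR"
    · rw [if_neg (by simp [h2]), ih]
      simp [h2]
    · rw [if_pos h2, ih, PySem.Dict.getD_foldl_modify_add_one]
      have hcnt : (PySem.Set.ofList op).count r = if r ∈ op then 1 else 0 := by
        by_cases hm : r ∈ op
        · rw [if_pos hm]
          exact List.count_eq_one_of_mem (PySem.Set.nodup_ofList op)
            (by simpa [PySem.Set.mem_ofList] using hm)
        · rw [if_neg hm]
          simp [List.count_eq_zero, PySem.Set.mem_ofList, hm]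
      rw [hcnt]
      by_cases hm : r ∈ op
      · simp [hm, h2]
        ring
      · simp [hm]

theorem pvCnt_getD (r : String) (vs : List (List String)) :
    (pvCnt vs).getD r 0
    = (vs.countP (fun op => op.contains r && !(PySem.List.pyGetD op 1 "" == "OR")) : Nat) := by
  have h := pv_cnt_getD r vs PySem.Dict.empty
  simpa [pvCnt] using h

-- ===== VERDICT (by name: the statement is the Claim_ definition above) =====
theorem extract_wrong_and_operations_spec : Claim_equal_extract_wrong_and_operations := by
  intro rvto ivd _ _
  unfold Spec_extract_wrong_and_operations extract_wrong_and_operations extract_wrong_and_operations_alt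
  simp only []
  apply PySem.List.foldl_congr_mem
  intro acc p _
  by_cases h1 : PySem.List.pyGetD p.2 1 "" = "AND"
  · by_cases hm : "x00" ∈ p.2
    · rw [if_pos h1, if_pos (by simpa using hm), if_neg (by simp [h1, hm])]
    · rw [if_pos h1, if_neg (by simpa using hm),
        if_pos ⟨h1, by simpa using hm⟩, pv_inner_eq, pvCnt_getD]
      simp
  · rw [if_neg h1, if_neg (by simp [h1])]
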